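-- pv_equiv track=rewrite | github.com/darth-ctrayn/macro_keyboard | macro_keyboard.py | parse
-- ===== SOURCE A (Python) =====
-- def parse( keys:str ):
--     """Takes 'keys' as a input string, anything in brackets {} is a command key (ctl, shift, etc...). To turn off a command key, use {/command} ({/shift}, {/ctl}) returns as array"""
--     to_send = []
--     current_keys = keys
--     while len(current_keys) > 0:
--         # Get the first key of the string
--         key = current_keys[0]
--         current_keys = current_keys.replace(current_keys[0], "", 1)
--
--         # Control keys
--         if key == '{':
--             to_send.append( current_keys[:current_keys.find('}')])
--             current_keys = current_keys[current_keys.find('}') + 1:]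
--         # Non-control keys (regular keys)
--         else:
--             to_send.append(key)
--     return to_send
-- ===== SOURCE B (Python) =====
-- def parse(keys: str):
--     """Single linear pass with an index pointer; '{' jumps to the next '}' by slicing."""
--     to_send = []
--     i = 0
--     n = len(keys)
--     while i < n:
--         if keys[i] == '{':
--             j = keys.find('}', i + 1)
--             if j == -1:
--                 to_send.append(keys[i + 1:])
--                 i = n
--             else:
--                 to_send.append(keys[i + 1:j])
--                 i = j + 1
--         else:
--             to_send.append(keys[i])
--             i += 1
--     return to_send
-- ===== Notes on version B (the rewrite author's own statement) =====
-- stated objective: faster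
-- what changed: B replaces A's per-iteration rebuilding of the remaining string (str.replace plus two full re-slices of the remainder for every token) by a single linear pass with an index pointer that slices each token out directly and jumps past the next '}'.
-- intended difference: On strings with a non-final '{' that has no '}' after it (an unterminated command), A returns an accidental value: it appends the remainder minus its last character and then re-parses that same remainder character by character (e.g. '{ab' -> ['a','a','b']), while B returns the unterminated command's text as one token ('{ab' -> ['ab']), the intended reading. — e.g. on parse("{x"): A returns ["", "x"], B returns ["x"]
import Mathlib
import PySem

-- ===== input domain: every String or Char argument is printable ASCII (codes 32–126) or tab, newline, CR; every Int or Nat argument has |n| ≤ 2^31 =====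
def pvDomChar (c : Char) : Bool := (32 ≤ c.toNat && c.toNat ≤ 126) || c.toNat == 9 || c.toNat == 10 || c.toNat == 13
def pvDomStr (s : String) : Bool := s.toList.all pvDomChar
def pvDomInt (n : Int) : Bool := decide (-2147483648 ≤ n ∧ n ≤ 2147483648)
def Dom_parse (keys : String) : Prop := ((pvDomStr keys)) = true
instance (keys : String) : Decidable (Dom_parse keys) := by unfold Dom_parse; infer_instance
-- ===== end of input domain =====

-- B replaces A's repeated string rebuilding (replace / re-slicing the whole remainder each
-- iteration) by one linear pass with an index pointer that slices directly to the next '}'.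

-- ===== PORT A =====
-- hand port of Python's s.replace(c, "", 1) for a single-char pattern: removes the first
-- occurrence of c; exact because '' never matches differently for a 1-char pattern.
def pvRemoveOnce (c : Char) : List Char → List Char
  | [] => []
  | x :: xs => if x = c then xs else x :: pvRemoveOnce c xs

-- A's while loop; fuel = |keys| + 1 is enough for every terminating run of the Python loop
-- (each iteration consumes at least one character, except the final empty-remainder step).
def parseAGo : Nat → List Char → List String → List String
  | 0, _, acc => acc
  | _ + 1, [], acc => acc
  | fuel + 1, key :: tl, acc =>
      let cur := pvRemoveOnce key (key :: tl)   -- current_keys = current_keys.replace(current_keys[0], "", 1)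
      if key = '{' then
        let j := PySem.Chars.find cur ['}']
        parseAGo fuel (PySem.List.slice cur (some (j + 1)) none)
          (acc ++ [String.ofList (PySem.List.slice cur none (some j))])
      else
        parseAGo fuel cur (acc ++ [String.ofList [key]])

def parse (keys : String) : List String := parseAGo (keys.toList.length + 1) keys.toList []

-- ===== PORT B =====
-- B's while loop over the index pointer i; fuel = |keys| + 1 bounds its iteration count
-- (i strictly increases each iteration), keeping the recursion structural.
def parseBGo : Nat → List Char → Nat → List String → List String
  | 0, _, _, acc => acc
  | fuel + 1, s, i, acc =>
    if h : i < s.length then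
      if s[i] = '{' then
        let j := PySem.Chars.findFrom s ['}'] ((i : Int) + 1) none
        if j = -1 then
          acc ++ [String.ofList (PySem.List.slice s (some ((i : Int) + 1)) none)]   -- i = n: loop ends
        else
          parseBGo fuel s (j.toNat + 1) (acc ++ [String.ofList (PySem.List.slice s (some ((i : Int) + 1)) (some j))])
      else
        parseBGo fuel s (i + 1) (acc ++ [String.ofList [s[i]]])
    else acc

def parse_alt (keys : String) : List String := parseBGo (keys.toList.length + 1) keys.toList 0 []

-- ===== PRECONDITION & SPEC =====
-- On strings with a non-final '{' followed by no '}' (an unterminated command), A returns an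
-- accidental value — it appends the remainder minus its LAST character and then re-parses that
-- same remainder character by character (e.g. '{ab' -> ['a','a','b']) — while B returns the
-- unterminated command's text as one token ('{ab' -> ['ab']), which is the intended reading.
-- linear-time closed form: '{' occurs after the last '}' and is not the final character,
-- i.e. the string has an unterminated, non-final command opener
def D_parse (keys : String) : Prop :=
  '{' ∈ (keys.toList.reverse.takeWhile (fun c => c != '}')).tail
instance (keys : String) : Decidable (D_parse keys) := by unfold D_parse; infer_instance

def Spec_parse (keys : String) (out : List String) : Prop := ¬ D_parse keys → out = parse_alt keys
instance (keys : String) (out : List String) : Decidable (Spec_parse keys out) := by unfold Spec_parse; infer_instance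

def pvDiffWitness_parse : String := "{x"
def pvDiffWitnessOut_parse : (List String) × (List String) := (["", "x"], ["x"])

-- ===== CLAIM (what is proved, stated in full; the proofs are below) =====
def Claim_unchanged_parse : Prop := ∀ (keys : String), Dom_parse keys → Spec_parse keys (parse keys)
def Claim_changed_parse : Prop := Dom_parse (pvDiffWitness_parse) ∧ D_parse (pvDiffWitness_parse) ∧ parse (pvDiffWitness_parse) = pvDiffWitnessOut_parse.1 ∧ parse_alt (pvDiffWitness_parse) = pvDiffWitnessOut_parse.2 ∧ pvDiffWitnessOut_parse.1 ≠ pvDiffWitnessOut_parse.2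

-- ===== LEMMAS AND PROOFS =====

lemma parseAGo_nil (fuel : Nat) (acc : List String) : parseAGo fuel [] acc = acc := by
  cases fuel <;> rfl

theorem go_eq (s : List Char)
    (hs : ∀ i, (h : i < s.length) → s[i] = '{' → i = s.length - 1 ∨ '}' ∈ s.drop (i + 1)) :
    ∀ fuel i acc, (s.drop i).length + 1 ≤ fuel →
      parseAGo fuel (s.drop i) acc = parseBGo fuel s i acc := by
  intro fuel
  induction fuel with
  | zero => intro i acc h; omega
  | succ fuel ih =>
    intro i acc hfuel
    by_cases hi : i < s.length
    · have hdrop : s.drop i = s[i] :: s.drop (i + 1) := List.drop_eq_getElem_cons hi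
      rw [hdrop]
      simp only [parseAGo, parseBGo, pvRemoveOnce, if_true, dif_pos hi]
      by_cases hch : s[i] = '{'
      · simp only [if_pos hch]
        have hk : i + 1 ≤ s.length := hi
        have hff : PySem.Chars.findFrom s ['}'] ((i : Int) + 1) none =
            if PySem.Chars.find (s.drop (i + 1)) ['}'] = -1 then -1
            else (i : Int) + 1 + PySem.Chars.find (s.drop (i + 1)) ['}'] := by
          have := PySem.Chars.findFrom_natCast s ['}'] (i + 1) hk
          push_cast at this
          simpa using this
        set f := PySem.Chars.find (s.drop (i + 1)) ['}'] with hfdef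
        by_cases hf : f = -1
        · -- no '}' after this '{': Pre_ forces the remainder to be empty
          have hnil : s.drop (i + 1) = [] := by
            rcases hs i hi hch with hlast | hmem
            · exact List.drop_eq_nil_of_le (by omega)
            · exfalso
              have hne : f ≠ -1 := by
                rw [hfdef]
                exact (PySem.Chars.find_ne_neg_one_iff _ _).mpr
                  ((List.singleton_infix_iff _ _).mpr hmem)
              exact hne hf
          rw [hff, if_pos hf]
          simp only [if_pos]
          rw [hnil, hf]
          have h01 : (-1 : Int) + 1 = ((0 : Nat) : Int) := by norm_num
          rw [h01, PySem.List.slice_from_natCast, List.drop_nil,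
            PySem.List.slice_to_neg_one, List.dropLast_nil, parseAGo_nil]
          have hsl : PySem.List.slice s (some ((i : Int) + 1)) none = s.drop (i + 1) := by
            have h2 := PySem.List.slice_from_natCast s (i + 1)
            push_cast at h2
            simpa using h2
          rw [hsl, hnil]
        · -- '}' found at suffix position f ≥ 0
          have hf0 : 0 ≤ f := by
            have := PySem.Chars.neg_one_le_find (s.drop (i + 1)) ['}']
            rw [← hfdef] at this; omega
          rw [hff, if_neg hf]
          have hj0 : ¬ ((i : Int) + 1 + f = -1) := by omega
          simp only [if_neg hj0]
          have htokA : PySem.List.slice (s.drop (i + 1)) none (some f) =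
              (s.drop (i + 1)).take f.toNat := PySem.List.slice_to _ hf0
          have htokB : PySem.List.slice s (some ((i : Int) + 1)) (some ((i : Int) + 1 + f)) =
              (s.drop (i + 1)).take f.toNat := by
            rw [PySem.List.slice_toNat s (by omega) (by omega)]
            have h1 : (((i : Int) + 1 + f).toNat - ((i : Int) + 1).toNat) = f.toNat := by omega
            have h2 : ((i : Int) + 1).toNat = i + 1 := by omega
            rw [h1, h2]
          have hremA : PySem.List.slice (s.drop (i + 1)) (some (f + 1)) none =
              s.drop (((i : Int) + 1 + f).toNat + 1) := by
            rw [PySem.List.slice_from _ (by omega), List.drop_drop]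
            congr 1; omega
          rw [htokA, htokB, hremA]
          exact ih _ _ (by simp only [List.length_drop] at hfuel ⊢; omega)
      · simp only [if_neg hch]
        exact ih (i + 1) _ (by simp only [List.length_drop] at hfuel ⊢; omega)
    · rw [List.drop_eq_nil_of_le (by omega : s.length ≤ i), parseAGo_nil, parseBGo, dif_neg hi]

-- an unterminated non-final '{' at index i puts the string inside D_parse
lemma D_of_unterminated (s : List Char) (i : Nat) (h : i < s.length) (hc : s[i] = '{')
    (hne : i ≠ s.length - 1) (hnm : '}' ∉ s.drop (i + 1)) :
    '{' ∈ (s.reverse.takeWhile (fun c => c != '}')).tail := by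
  have hlt : i + 1 < s.length := by omega
  have hsplit : s.reverse = (s.drop (i + 1)).reverse ++ ([s[i]] ++ (s.take i).reverse) := by
    conv_lhs => rw [← List.take_append_drop (i + 1) s,
      List.take_succ_eq_append_getElem h]
    simp
  have hall : ∀ x ∈ (s.drop (i + 1)).reverse, (x != '}') = true := by
    intro x hx
    simp only [List.mem_reverse] at hx
    simp only [bne_iff_ne, ne_eq]
    exact fun hxe => hnm (hxe ▸ hx)
  have hAne : (s.drop (i + 1)).reverse ≠ [] := by
    simp only [ne_eq, List.reverse_eq_nil_iff, List.drop_eq_nil_iff]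
    omega
  rw [hsplit, List.takeWhile_append_of_pos hall, List.tail_append_of_ne_nil hAne]
  refine List.mem_append_right _ ?_
  have : ([s[i]] ++ (s.take i).reverse).takeWhile (fun c => c != '}') =
      s[i] :: ((s.take i).reverse.takeWhile (fun c => c != '}')) := by
    simp [hc]
  rw [this, hc]
  exact List.mem_cons_self ..

-- ===== VERDICT (by name: the statement is the Claim_ definition above) =====
theorem parse_spec : Claim_unchanged_parse := by
  intro keys _ hnd
  unfold parse parse_alt
  set s := keys.toList with hsdef
  have hs : ∀ i, (h : i < s.length) → s[i] = '{' →
      i = s.length - 1 ∨ '}' ∈ s.drop (i + 1) := by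
    intro i h hc
    by_contra hcon
    push Not at hcon
    exact hnd (D_of_unterminated s i h hc hcon.1 hcon.2)
  simpa using go_eq s hs (s.length + 1) 0 [] (by simp)

theorem parse_changed : Claim_changed_parse := by unfold Claim_changed_parse; decide
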